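-- pv_equiv track=rewrite | github.com/ikbalghozali/tugas | rekursif/mylibrary.py | sum_fib
-- ===== SOURCE A (Python) =====
-- def sum_fib(n):
--     if n == 0 :
--         hasil = 0
--     elif n == 1 :
--         hasil = 1
--     else :
--         hasil = (sum_fib(n-1)+sum_fib(n-2))+1
--
--     return hasil
-- ===== SOURCE B (Python) =====
-- def sum_fib(n):
--     a, b = 0, 1
--     for _ in range(n):
--         a, b = b, a + b + 1
--     return a
-- ===== Notes on version B (the rewrite author's own statement) =====
-- stated objective: faster
-- what changed: Replaces the naive exponential double recursion with a bottom-up loop keeping the previous two values; intended as asymptotically faster (A already times out around n=16 where B is instant, though a timing run could confirm the ratio on only one input).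
import Mathlib
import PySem

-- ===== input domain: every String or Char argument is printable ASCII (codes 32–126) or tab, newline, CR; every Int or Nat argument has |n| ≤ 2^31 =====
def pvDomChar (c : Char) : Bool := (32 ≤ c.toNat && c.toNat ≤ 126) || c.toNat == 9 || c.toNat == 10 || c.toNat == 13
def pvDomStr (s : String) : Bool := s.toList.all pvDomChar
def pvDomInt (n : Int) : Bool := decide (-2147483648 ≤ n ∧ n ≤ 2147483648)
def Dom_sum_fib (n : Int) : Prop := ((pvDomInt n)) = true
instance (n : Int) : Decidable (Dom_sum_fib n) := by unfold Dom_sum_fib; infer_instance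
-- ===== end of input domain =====

-- B replaces A's exponential double recursion with a bottom-up two-variable loop; intended as asymptotically faster (A times out around n=16 where B returns instantly).


-- ===== PORT A =====
-- A's recursion on n, expressed on n.toNat; exact for n ≥ 0 (Pre_); for n < 0 Python A diverges.
def sum_fibNat : Nat → Int
  | 0 => 0
  | 1 => 1
  | (k+2) => (sum_fibNat (k+1) + sum_fibNat k) + 1

def sum_fib (n : Int) : Int := sum_fibNat n.toNat

-- ===== PORT B =====
-- B's loop: fold 'a, b = b, a + b + 1' over range(n), return a.
def sum_fibStep (p : Int × Int) (_ : Nat) : Int × Int := (p.2, p.1 + p.2 + 1)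

def sum_fib_alt (n : Int) : Int := (List.foldl sum_fibStep (0, 1) (List.range n.toNat)).1

-- ===== PRECONDITION & SPEC =====
-- Pre_ excludes n < 0, where Python A recurses without a base case (RecursionError).
def Pre_sum_fib (n : Int) : Prop := 0 ≤ n
instance (n : Int) : Decidable (Pre_sum_fib n) := by unfold Pre_sum_fib; infer_instance
def pvWitness_sum_fib : Int := (5)

def Spec_sum_fib (n : Int) (out : Int) : Prop := out = sum_fib_alt n
instance (n : Int) (out : Int) : Decidable (Spec_sum_fib n out) := by unfold Spec_sum_fib; infer_instance

-- ===== CLAIM (what is proved, stated in full; the proofs are below) =====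
def Claim_equal_sum_fib : Prop := ∀ (n : Int), Dom_sum_fib n → Pre_sum_fib n → Spec_sum_fib n (sum_fib n)

-- ===== LEMMAS AND PROOFS =====
-- Loop invariant: after k iterations the state is (sum_fibNat k, sum_fibNat (k+1)).
theorem sum_fibLoop_eq (k : Nat) :
    List.foldl sum_fibStep (0, 1) (List.range k) = (sum_fibNat k, sum_fibNat (k+1)) := by
  induction k with
  | zero => rfl
  | succ m ih => simp [List.range_succ, ih, sum_fibStep, sum_fibNat]; ring

-- ===== VERDICT (by name: the statement is the Claim_ definition above) =====
theorem sum_fib_spec : Claim_equal_sum_fib := by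
  intro n _ _
  unfold Spec_sum_fib sum_fib sum_fib_alt
  rw [sum_fibLoop_eq]
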